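-- pv_equiv track=rewrite | github.com/jurjsorinliviu/Transferable-Structural-Search-for-Ramsey-Graph-Construction | ramsey_search.py | ordered_candidate_pool
-- ===== SOURCE A (Python) =====
-- def ordered_candidate_pool(n: int, prioritized: list[int]) -> list[int]:
--     full = list(range(1, (n // 2) + 1))
--     seen = set()
--     ordered = []
--     for shift in prioritized + full:
--         if shift not in seen and 0 < shift <= n // 2:
--             ordered.append(shift)
--             seen.add(shift)
--     return ordered
-- ===== SOURCE B (Python) =====
-- def ordered_candidate_pool(n: int, prioritized: list[int]) -> list[int]:
--     half = n // 2
--     m = len(prioritized)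
--     first = {}
--     for i, s in enumerate(prioritized):
--         if s not in first:
--             first[s] = i
--     return sorted(range(1, half + 1), key=lambda s: first.get(s, m + s))
-- ===== Notes on version B (the rewrite author's own statement) =====
-- stated objective: alternative
-- what changed: Instead of a seen-set filtered loop over prioritized+range, B records each value's first-occurrence index in one dict pass and then sorts range(1, n//2+1) by that priority key (index if prioritized, else len(prioritized)+value), with no dedup loop and no seen set.
import Mathlib
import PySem

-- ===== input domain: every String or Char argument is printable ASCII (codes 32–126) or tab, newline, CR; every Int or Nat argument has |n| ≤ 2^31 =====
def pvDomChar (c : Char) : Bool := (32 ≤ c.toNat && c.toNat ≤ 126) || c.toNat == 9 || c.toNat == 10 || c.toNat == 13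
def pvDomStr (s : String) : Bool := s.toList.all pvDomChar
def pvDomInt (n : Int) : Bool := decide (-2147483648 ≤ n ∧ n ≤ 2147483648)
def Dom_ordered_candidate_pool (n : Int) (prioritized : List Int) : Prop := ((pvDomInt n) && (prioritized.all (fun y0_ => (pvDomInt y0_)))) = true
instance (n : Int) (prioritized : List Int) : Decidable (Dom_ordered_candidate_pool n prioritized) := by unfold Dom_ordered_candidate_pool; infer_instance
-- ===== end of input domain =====

-- B replaces A's seen-set filtered loop over prioritized + range by a sort: one dict pass records each
-- value's first-occurrence index, then range(1, n//2 + 1) is sorted by that priority key.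
-- ===== PORT A =====
-- A's loop body on the (seen, ordered) state, as a named helper used by the port
def pvAStep (half : Int) (st : PySem.Set Int × List Int) (shift : Int) : PySem.Set Int × List Int :=
  if shift ∉ st.1 ∧ 0 < shift ∧ shift ≤ half then
    (PySem.Set.add st.1 shift, st.2 ++ [shift])
  else st

def ordered_candidate_pool (n : Int) (prioritized : List Int) : List Int :=
  let full := PySem.List.pyRange 1 (PySem.Int.floordiv n 2 + 1) 1
  ((prioritized ++ full).foldl (pvAStep (PySem.Int.floordiv n 2)) (PySem.Set.empty, [])).2

-- ===== PORT B =====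
-- B's dict-building loop body ('if s not in first: first[s] = i')
def pvBStep (d : PySem.Dict Int Int) (p : Int × Int) : PySem.Dict Int Int :=
  if PySem.Dict.contains d p.2 then d else PySem.Dict.insert d p.2 p.1

def ordered_candidate_pool_alt (n : Int) (prioritized : List Int) : List Int :=
  let half := PySem.Int.floordiv n 2
  let m : Int := prioritized.length
  let first := (PySem.List.enumerate prioritized 0).foldl pvBStep PySem.Dict.empty
  PySem.List.sorted (PySem.List.pyRange 1 (half + 1) 1)
    (fun s => PySem.Dict.getD first s (m + s)) false

-- ===== PRECONDITION & SPEC =====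
def Spec_ordered_candidate_pool (n : Int) (prioritized : List Int) (out : List Int) : Prop := out = ordered_candidate_pool_alt n prioritized
instance (n : Int) (prioritized : List Int) (out : List Int) : Decidable (Spec_ordered_candidate_pool n prioritized out) := by unfold Spec_ordered_candidate_pool; infer_instance

-- ===== CLAIM (what is proved, stated in full; the proofs are below) =====
def Claim_equal_ordered_candidate_pool : Prop := ∀ (n : Int) (prioritized : List Int), Dom_ordered_candidate_pool n prioritized → Spec_ordered_candidate_pool n prioritized (ordered_candidate_pool n prioritized)

-- ===== LEMMAS AND PROOFS =====

-- Once a key is in the dict it never changes (pvBStep only inserts absent keys).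
theorem pv_dict_stab (l : List Int) : ∀ (i0 : Int) (d : PySem.Dict Int Int) (k : Int),
    (PySem.Dict.get? d k).isSome →
    PySem.Dict.get? ((PySem.List.enumerate l i0).foldl pvBStep d) k = PySem.Dict.get? d k := by
  induction l with
  | nil => intro i0 d k _; simp [PySem.List.enumerate_nil]
  | cons x t ih =>
    intro i0 d k hk
    rw [PySem.List.enumerate_cons, List.foldl_cons]
    by_cases hc : PySem.Dict.contains d x
    · simpa [pvBStep, hc] using ih (i0 + 1) d k hk
    · have hkx : k ≠ x := by
        intro e
        rw [e] at hk
        rw [(PySem.Dict.get?_eq_none_iff_contains d x).mpr (by simpa using hc)] at hk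
        simp at hk
      rw [show pvBStep d (i0, x) = PySem.Dict.insert d x i0 by simp [pvBStep, hc]]
      rw [ih (i0 + 1) _ k (by rwa [PySem.Dict.get?_insert_of_ne _ _ hkx]),
          PySem.Dict.get?_insert_of_ne _ _ hkx]

-- A's loop over in-range duplicate-free shifts appends exactly the not-yet-seen ones.
theorem pv_phase2 (half : Int) (l : List Int) :
    ∀ (st : PySem.Set Int × List Int), l.Nodup → (∀ x ∈ l, 0 < x ∧ x ≤ half) →
    (l.foldl (pvAStep half) st).2 = st.2 ++ l.filter (fun s => decide (s ∉ st.1)) := by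
  induction l with
  | nil => intro st _ _; simp
  | cons x tl ih =>
    intro st nd bd
    have hx0 : 0 < x ∧ x ≤ half := bd x (by simp)
    have hxtl : x ∉ tl := (List.nodup_cons.mp nd).1
    by_cases hx : x ∈ st.1
    · have : ¬ (x ∉ st.1 ∧ 0 < x ∧ x ≤ half) := by tauto
      simp only [List.foldl_cons, pvAStep, if_neg this]
      rw [ih st (List.nodup_cons.mp nd).2 (fun y hy => bd y (by simp [hy]))]
      simp [hx]
    · have : (x ∉ st.1 ∧ 0 < x ∧ x ≤ half) := ⟨hx, hx0⟩
      simp only [List.foldl_cons, pvAStep, if_pos this]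
      rw [ih _ (List.nodup_cons.mp nd).2 (fun y hy => bd y (by simp [hy]))]
      have hfil : tl.filter (fun s => decide (s ∉ PySem.Set.add st.1 x))
          = tl.filter (fun s => decide (s ∉ st.1)) := by
        apply List.filter_congr
        intro y hy
        have : y ≠ x := fun e => hxtl (e ▸ hy)
        simp [PySem.Set.mem_add, this]
      rw [hfil]
      simp [hx, List.append_assoc]

-- Joint invariant of A's prioritized loop and B's first-occurrence dict:
-- the appended shifts Pext are the valid unseen ones, duplicate-free, and their dict
-- indices exist, lie in [i0, i0 + len l), and strictly increase along Pext.
theorem pv_joint (half : Int) (l : List Int) :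
    ∀ (i0 : Int) (seen : PySem.Set Int) (P : List Int) (d : PySem.Dict Int Int),
    (∀ s : Int, 0 < s → s ≤ half → (s ∈ seen ↔ (PySem.Dict.get? d s).isSome = true)) →
    ∃ Pext : List Int,
      (l.foldl (pvAStep half) (seen, P)).2 = P ++ Pext ∧
      (∀ s : Int, s ∈ (l.foldl (pvAStep half) (seen, P)).1 ↔ (s ∈ seen ∨ s ∈ Pext)) ∧
      (∀ s : Int, 0 < s → s ≤ half →
        (s ∈ (l.foldl (pvAStep half) (seen, P)).1 ↔
          (PySem.Dict.get? ((PySem.List.enumerate l i0).foldl pvBStep d) s).isSome = true)) ∧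
      (∀ a ∈ Pext, 0 < a ∧ a ≤ half ∧ a ∉ seen) ∧
      Pext.Nodup ∧
      (∀ a ∈ Pext, ∃ j : Int,
        PySem.Dict.get? ((PySem.List.enumerate l i0).foldl pvBStep d) a = some j ∧
        i0 ≤ j ∧ j < i0 + l.length) ∧
      Pext.Pairwise (fun a b => ∀ ja jb : Int,
        PySem.Dict.get? ((PySem.List.enumerate l i0).foldl pvBStep d) a = some ja →
        PySem.Dict.get? ((PySem.List.enumerate l i0).foldl pvBStep d) b = some jb → ja < jb) := by
  induction l with
  | nil =>
    intro i0 seen P d hinv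
    exact ⟨[], by simp, by simp, by
      simpa [PySem.List.enumerate_nil] using hinv, by simp, by simp, by simp, by simp⟩
  | cons x t ih =>
    intro i0 seen P d hinv
    rw [PySem.List.enumerate_cons]
    by_cases hval : 0 < x ∧ x ≤ half
    · by_cases hxs : x ∈ seen
      · -- seen before: both sides skip (dict already has x)
        have hd : PySem.Dict.contains d x = true := by
          by_contra hc
          have hn : PySem.Dict.get? d x = none :=
            (PySem.Dict.get?_eq_none_iff_contains d x).mpr (by simpa using hc)
          have := (hinv x hval.1 hval.2).mp hxs
          rw [hn] at this
          simp at this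
        have hA : pvAStep half (seen, P) x = (seen, P) := by
          simp [pvAStep, hxs]
        have hB : pvBStep d (i0, x) = d := by simp [pvBStep, hd]
        rw [List.foldl_cons, List.foldl_cons, hA, hB]
        rcases ih (i0 + 1) seen P d hinv with
          ⟨Pext, h1, h2, h3, h4, h5, h6, h7⟩
        refine ⟨Pext, h1, h2, h3, h4, h5, ?_, h7⟩
        intro a ha
        rcases h6 a ha with ⟨j, hj, hj1, hj2⟩
        refine ⟨j, hj, by omega, ?_⟩
        simp only [List.length_cons]
        push_cast
        omega
      · -- new valid shift: A appends, B records index i0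
        have hd : ¬ PySem.Dict.contains d x = true := by
          intro hc
          apply hxs
          apply (hinv x hval.1 hval.2).mpr
          by_contra hs
          have hn : PySem.Dict.get? d x = none :=
            Option.not_isSome_iff_eq_none.mp (by simpa using hs)
          have := (PySem.Dict.get?_eq_none_iff_contains d x).mp hn
          rw [hc] at this
          exact Bool.noConfusion this
        have hA : pvAStep half (seen, P) x = (PySem.Set.add seen x, P ++ [x]) := by
          simp [pvAStep, hxs, hval.1, hval.2]
        have hB : pvBStep d (i0, x) = PySem.Dict.insert d x i0 := by
          simp [pvBStep, hd]
        rw [List.foldl_cons, List.foldl_cons, hA, hB]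
        have hinv' : ∀ s : Int, 0 < s → s ≤ half →
            (s ∈ PySem.Set.add seen x ↔
              (PySem.Dict.get? (PySem.Dict.insert d x i0) s).isSome = true) := by
          intro s hs1 hs2
          by_cases hsx : s = x
          · subst hsx
            simp [PySem.Set.mem_add, PySem.Dict.get?_insert_self]
          · rw [PySem.Dict.get?_insert_of_ne _ _ hsx]
            rw [PySem.Set.mem_add]
            constructor
            · rintro (h | h)
              · exact (hinv s hs1 hs2).mp h
              · exact absurd h hsx
            · intro h; exact Or.inl ((hinv s hs1 hs2).mpr h)
        rcases ih (i0 + 1) (PySem.Set.add seen x) (P ++ [x]) (PySem.Dict.insert d x i0) hinv' with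
          ⟨Pext, h1, h2, h3, h4, h5, h6, h7⟩
        have hgx : PySem.Dict.get?
            ((PySem.List.enumerate t (i0 + 1)).foldl pvBStep (PySem.Dict.insert d x i0)) x
            = some i0 := by
          rw [pv_dict_stab t (i0 + 1) _ x (by rw [PySem.Dict.get?_insert_self]; simp),
            PySem.Dict.get?_insert_self]
        have hxPext : x ∉ Pext := by
          intro hx
          have := (h4 x hx).2.2
          exact this (by simp [PySem.Set.mem_add])
        refine ⟨x :: Pext, by rw [h1]; simp, ?_, h3, ?_, ?_, ?_, ?_⟩
        · intro s
          rw [h2 s, PySem.Set.mem_add]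
          constructor
          · rintro ((h | h) | h)
            · exact Or.inl h
            · exact Or.inr (by simp [h])
            · exact Or.inr (by simp [h])
          · rintro (h | h)
            · exact Or.inl (Or.inl h)
            · rcases List.mem_cons.mp h with h | h
              · exact Or.inl (Or.inr h)
              · exact Or.inr h
        · intro a ha
          rcases List.mem_cons.mp ha with h | h
          · subst h; exact ⟨hval.1, hval.2, hxs⟩
          · rcases h4 a h with ⟨ha1, ha2, ha3⟩
            refine ⟨ha1, ha2, fun hc => ha3 (by simp [PySem.Set.mem_add, hc])⟩
        · exact List.nodup_cons.mpr ⟨hxPext, h5⟩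
        · intro a ha
          rcases List.mem_cons.mp ha with h | h
          · subst h
            refine ⟨i0, hgx, le_refl _, ?_⟩
            simp only [List.length_cons]
            push_cast
            omega
          · rcases h6 a h with ⟨j, hj, hj1, hj2⟩
            refine ⟨j, hj, by omega, ?_⟩
            simp only [List.length_cons]
            push_cast
            omega
        · refine List.pairwise_cons.mpr ⟨?_, h7⟩
          intro b hb ja jb hja hjb
          rcases h6 b hb with ⟨j, hj, hj1, hj2⟩
          rw [hgx] at hja
          rw [hj] at hjb
          have e1 : i0 = ja := Option.some.inj hja
          have e2 : j = jb := Option.some.inj hjb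
          omega
    · -- out-of-range shift: A skips; B may record it, at a key no range element reads
      have hA : pvAStep half (seen, P) x = (seen, P) := by
        simp only [pvAStep]
        rw [if_neg (by tauto)]
      have hinv' : ∀ s : Int, 0 < s → s ≤ half →
          (s ∈ seen ↔ (PySem.Dict.get? (pvBStep d (i0, x)) s).isSome = true) := by
        intro s hs1 hs2
        have hsx : s ≠ x := by intro e; subst e; exact hval ⟨hs1, hs2⟩
        simp only [pvBStep]
        by_cases hc : PySem.Dict.contains d x
        · rw [if_pos hc]; exact hinv s hs1 hs2
        · rw [if_neg hc, PySem.Dict.get?_insert_of_ne _ _ hsx]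
          exact hinv s hs1 hs2
      rw [List.foldl_cons, List.foldl_cons, hA]
      rcases ih (i0 + 1) seen P (pvBStep d (i0, x)) hinv' with
        ⟨Pext, h1, h2, h3, h4, h5, h6, h7⟩
      refine ⟨Pext, h1, h2, h3, h4, h5, ?_, h7⟩
      intro a ha
      rcases h6 a ha with ⟨j, hj, hj1, hj2⟩
      refine ⟨j, hj, by omega, ?_⟩
      simp only [List.length_cons]
      push_cast
      omega

-- ===== VERDICT (by name: the statement is the Claim_ definition above) =====
theorem ordered_candidate_pool_spec : Claim_equal_ordered_candidate_pool := by
  intro n p _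
  unfold Spec_ordered_candidate_pool ordered_candidate_pool ordered_candidate_pool_alt
  dsimp only
  set half := PySem.Int.floordiv n 2 with hhalf
  set rng := PySem.List.pyRange 1 (half + 1) 1 with hrng
  set m : Int := (p.length : Int) with hm
  set D := (PySem.List.enumerate p 0).foldl pvBStep PySem.Dict.empty with hD
  rcases pv_joint half p 0 PySem.Set.empty [] PySem.Dict.empty
      (by intro s _ _; simp [PySem.Set.empty, PySem.Dict.get?_empty]) with
    ⟨Pext, h1, h2, h3, h4, h5, h6, h7⟩
  -- A's value: Pext then the unseen part of the range
  rw [List.foldl_append]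
  set st := p.foldl (pvAStep half) (PySem.Set.empty, []) with hst
  rw [pv_phase2 half rng st (PySem.List.nodup_pyRange_one 1 (half + 1))
      (fun x hx => by rw [PySem.List.mem_pyRange_one] at hx; omega)]
  rw [h1]
  simp only [List.nil_append]
  -- facts about seen/dict membership
  have hseen : ∀ s : Int, s ∈ st.1 ↔ s ∈ Pext := by
    intro s; rw [h2 s]; simp [PySem.Set.empty]
  have hdict : ∀ s : Int, 0 < s → s ≤ half →
      (s ∈ st.1 ↔ (PySem.Dict.get? D s).isSome = true) := h3
  -- key values
  have hkeyP : ∀ a ∈ Pext, ∃ j : Int, PySem.Dict.getD D a (m + a) = j ∧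
      PySem.Dict.get? D a = some j ∧ 0 ≤ j ∧ j < m := by
    intro a ha
    rcases h6 a ha with ⟨j, hj, hj1, hj2⟩
    exact ⟨j, by rw [PySem.Dict.getD_eq_get?_getD, hj]; rfl, hj, by omega, by omega⟩
  have hkeyF : ∀ s : Int, 0 < s → s ≤ half → s ∉ st.1 →
      PySem.Dict.getD D s (m + s) = m + s := by
    intro s hs1 hs2 hs3
    have : PySem.Dict.get? D s = none := by
      by_contra hc
      exact hs3 ((hdict s hs1 hs2).mpr (Option.isSome_iff_ne_none.mpr hc))
    rw [PySem.Dict.getD_eq_get?_getD, this]; rfl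
  -- the filter predicate, rewritten through the dict
  symm
  apply PySem.List.sorted_eq_of_perm_of_pairwise_lt
  · -- permutation
    have hnodupF : (rng.filter (fun s => decide (s ∉ st.1))).Nodup :=
      (PySem.List.nodup_pyRange_one 1 (half + 1)).filter _
    have hPf : Pext.Perm (rng.filter (fun s => decide (s ∈ st.1))) := by
      rw [List.perm_ext_iff_of_nodup h5 ((PySem.List.nodup_pyRange_one 1 (half + 1)).filter _)]
      intro a
      rw [List.mem_filter]
      constructor
      · intro ha
        rcases h4 a ha with ⟨ha1, ha2, _⟩
        exact ⟨by rw [PySem.List.mem_pyRange_one]; omega, by simp [hseen a |>.mpr ha]⟩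
      · rintro ⟨_, ha⟩
        exact (hseen a).mp (by simpa using ha)
    refine List.Perm.trans (hPf.append_right _) ?_
    have hneg : (fun s : Int => decide (s ∉ st.1)) = (fun s : Int => ! decide (s ∈ st.1)) := by
      funext s; simp
    rw [hneg]
    exact List.filter_append_perm _ rng
  · -- strictly increasing keys
    rw [List.pairwise_append]
    refine ⟨?_, ?_, ?_⟩
    · -- within Pext: dict indices strictly increase
      refine h7.imp_of_mem ?_
      intro a b ha hb hrel
      rcases hkeyP a ha with ⟨ja, hka, hga, _, _⟩
      rcases hkeyP b hb with ⟨jb, hkb, hgb, _, _⟩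
      rw [hka, hkb]
      exact hrel ja jb hga hgb
    · -- within the filtered range: keys are m + s, s increasing
      have hp : (rng.filter (fun s => decide (s ∉ st.1))).Pairwise (· < ·) :=
        (PySem.List.pairwise_lt_pyRange_one 1 (half + 1)).filter _
      refine hp.imp_of_mem ?_
      intro a b ha hb hab
      have ha' := List.mem_filter.mp ha
      have hb' := List.mem_filter.mp hb
      rw [PySem.List.mem_pyRange_one] at ha' hb'
      rw [hkeyF a (by omega) (by omega) (by simpa using ha'.2),
          hkeyF b (by omega) (by omega) (by simpa using hb'.2)]
      omega
    · -- across: an index < m is below every m + s with 1 ≤ s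
      intro a ha b hb
      rcases hkeyP a ha with ⟨ja, hka, _, _, hja⟩
      have hb' := List.mem_filter.mp hb
      rw [PySem.List.mem_pyRange_one] at hb'
      rw [hka, hkeyF b (by omega) (by omega) (by simpa using hb'.2)]
      omega
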